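-- pv_equiv track=rewrite | github.com/alexrvandam/DINOSAR_v2 | bold_jsonl_to_coi_fasta_qc.py | trim_trailing_ambig
-- ===== SOURCE A (Python) =====
-- def trim_trailing_ambig(seq: str, max_trim: int = 120) -> str:
--     """
--     Trim trailing runs of '-'/'N'/'?' (often padding artifacts).
--     max_trim prevents accidental removal of real data in extreme cases.
--     """
--     if not seq:
--         return seq
--     i = len(seq)
--     trimmed = 0
--     while i > 0 and trimmed < max_trim:
--         c = seq[i-1]
--         if c in "N-?":
--             i -= 1
--             trimmed += 1
--         else:
--             break
--     return seq[:i]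
-- ===== SOURCE B (Python) =====
-- def trim_trailing_ambig(seq: str, max_trim: int = 120) -> str:
--     """Single forward pass: remember the position just past the last non-ambiguous
--     character, then cut the trailing run capped at max_trim."""
--     keep = 0
--     for i, c in enumerate(seq):
--         if c not in "N-?":
--             keep = i + 1
--     removed = len(seq) - keep
--     return seq[: len(seq) - min(removed, max_trim)]
-- ===== Notes on version B (the rewrite author's own statement) =====
-- stated objective: alternative
-- what changed: Replaces A's backward while-loop that counts and breaks per trailing character with a single forward pass over enumerate(seq) that records the position just past the last non-ambiguous character, followed by a separate min(removed, max_trim) cap on the cut.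
import Mathlib
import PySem

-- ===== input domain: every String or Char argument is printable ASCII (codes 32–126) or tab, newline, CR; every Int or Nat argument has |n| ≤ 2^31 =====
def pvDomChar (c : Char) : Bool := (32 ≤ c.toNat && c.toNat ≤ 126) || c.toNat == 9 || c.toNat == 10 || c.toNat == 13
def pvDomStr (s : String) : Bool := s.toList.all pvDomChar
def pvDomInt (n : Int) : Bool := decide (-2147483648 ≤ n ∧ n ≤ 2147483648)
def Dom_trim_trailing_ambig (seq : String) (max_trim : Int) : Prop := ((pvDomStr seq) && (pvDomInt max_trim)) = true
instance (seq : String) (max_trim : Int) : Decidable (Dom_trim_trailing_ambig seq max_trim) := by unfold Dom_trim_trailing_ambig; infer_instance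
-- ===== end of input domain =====

-- B replaces A's backward count-and-break while-loop with a single forward pass
-- recording the position past the last non-ambiguous character, then a capped cut (alternative decomposition).

-- ===== PORT A =====
-- membership test against the ambiguity character set (N, dash, question mark)
def pvAmb (c : Char) : Bool := PySem.Chars.isIn [c] "N-?".toList

-- the while loop: state (i, trimmed); recursion on i (i decreases by 1 each iteration)
def pvLoopA (cs : List Char) (max_trim : Int) : Nat → Int → Nat
  | 0, _ => 0
  | i + 1, trimmed =>
    if trimmed < max_trim then
      match PySem.List.pyGet? cs ((i + 1 : Int) - 1) with   -- seq[i-1]; in range at every call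
      | some c => if pvAmb c then pvLoopA cs max_trim i (trimmed + 1) else i + 1
      | none => i + 1                                        -- unreachable: i + 1 ≤ cs.length at every call
    else i + 1

def trim_trailing_ambig (seq : String) (max_trim : Int) : String :=
  if seq.toList = [] then seq
  else
    let i := pvLoopA seq.toList max_trim seq.toList.length 0
    String.ofList (PySem.List.slice seq.toList none (some (i : Int)))   -- seq[:i]

-- ===== PORT B =====
-- the forward for-loop over enumerate(seq): keep = i+1 at each non-ambiguous character
def pvKeep (cs : List Char) : Int :=
  (PySem.List.enumerate cs).foldl (fun k p => if pvAmb p.2 then k else p.1 + 1) 0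

def trim_trailing_ambig_alt (seq : String) (max_trim : Int) : String :=
  let cs := seq.toList
  let removed : Int := (cs.length : Int) - pvKeep cs
  String.ofList (PySem.List.slice cs none (some ((cs.length : Int) - min removed max_trim)))

-- ===== PRECONDITION & SPEC =====
def Spec_trim_trailing_ambig (seq : String) (max_trim : Int) (out : String) : Prop := out = trim_trailing_ambig_alt seq max_trim
instance (seq : String) (max_trim : Int) (out : String) : Decidable (Spec_trim_trailing_ambig seq max_trim out) := by unfold Spec_trim_trailing_ambig; infer_instance

-- ===== CLAIM (what is proved, stated in full; the proofs are below) =====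
def Claim_equal_trim_trailing_ambig : Prop := ∀ (seq : String) (max_trim : Int), Dom_trim_trailing_ambig seq max_trim → Spec_trim_trailing_ambig seq max_trim (trim_trailing_ambig seq max_trim)

-- ===== LEMMAS AND PROOFS =====

-- the while loop ignores a snoc'd element once i is within the prefix
lemma pvLoopA_append (ys : List Char) (c : Char) (mt : Int) :
    ∀ i t, i ≤ ys.length → pvLoopA (ys ++ [c]) mt i t = pvLoopA ys mt i t := by
  intro i
  induction i with
  | zero => intro t _; rfl
  | succ n ih =>
    intro t hn
    simp only [pvLoopA]
    have h1 : ((n + 1 : Int) - 1) = (n : Int) := by ring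
    have hget : PySem.List.pyGet? (ys ++ [c]) ((n + 1 : Int) - 1)
        = PySem.List.pyGet? ys ((n + 1 : Int) - 1) := by
      rw [h1]
      simp only [PySem.List.pyGet?_natCast]
      rw [List.getElem?_append_left (by omega)]
    rw [hget]
    cases hg : PySem.List.pyGet? ys ((n + 1 : Int) - 1) with
    | none => simp
    | some d =>
      by_cases ht : t < mt
      · by_cases hd : pvAmb d <;> simp [ht, hd, ih (t + 1) (by omega)]
      · simp [ht]

-- characterisation of A's loop result: length minus the capped trailing ambiguous run
lemma pvLoopA_char (cs : List Char) (mt : Int) (t : Int) :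
    pvLoopA cs mt cs.length t
      = cs.length - min (cs.reverse.takeWhile pvAmb).length (mt - t).toNat := by
  induction cs using List.reverseRecOn generalizing t with
  | nil => simp [pvLoopA]
  | append_singleton ys c ih =>
    have hlen : (ys ++ [c]).length = ys.length + 1 := by simp
    rw [hlen]
    simp only [pvLoopA]
    by_cases ht : t < mt
    · have hget : PySem.List.pyGet? (ys ++ [c]) (((ys.length : Nat) + 1 : Int) - 1) = some c := by
        rw [show (((ys.length : Nat) + 1 : Int) - 1) = ((ys.length : Nat) : Int) by ring]
        simp
      rw [hget]
      by_cases hc : pvAmb c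
      · simp only [hc, if_true, ht, if_true]
        rw [pvLoopA_append ys c mt ys.length (t + 1) le_rfl, ih (t + 1)]
        have hrev : (ys ++ [c]).reverse.takeWhile pvAmb = c :: ys.reverse.takeWhile pvAmb := by
          simp [hc]
        rw [hrev]
        have : (mt - t).toNat = (mt - (t + 1)).toNat + 1 := by omega
        rw [this]
        simp only [List.length_cons]
        omega
      · have hrev : (ys ++ [c]).reverse.takeWhile pvAmb = [] := by
          simp [hc]
        simp [ht, hc]
    · have hrev0 : (mt - t).toNat = 0 := by omega
      simp [ht, hrev0]

-- the trailing run never exceeds the length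
lemma pvRun_le (cs : List Char) : (cs.reverse.takeWhile pvAmb).length ≤ cs.length := by
  have := (List.takeWhile_sublist (l := cs.reverse) pvAmb).length_le
  simpa using this

-- B's forward fold computes length minus the trailing ambiguous run
lemma pvKeep_char (cs : List Char) :
    pvKeep cs = (cs.length : Int) - ((cs.reverse.takeWhile pvAmb).length : Int) := by
  unfold pvKeep
  induction cs using List.reverseRecOn with
  | nil => simp
  | append_singleton ys c ih =>
    rw [PySem.List.enumerate_append, List.foldl_append]
    simp only [PySem.List.enumerate_cons, PySem.List.enumerate_nil, List.foldl_cons, List.foldl_nil]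
    by_cases hc : pvAmb c
    · have hrev : (ys ++ [c]).reverse.takeWhile pvAmb = c :: ys.reverse.takeWhile pvAmb := by
        simp [hc]
      simp only [hc, if_true, ih, hrev, List.length_append, List.length_cons]
      simp
    · have hrev : (ys ++ [c]).reverse.takeWhile pvAmb = [] := by simp [hc]
      simp only [hc, if_false, Bool.false_eq_true, hrev, List.length_append, List.length_cons,
        List.length_nil]
      push_cast; ring

-- ===== VERDICT (by name: the statement is the Claim_ definition above) =====
theorem trim_trailing_ambig_spec : Claim_equal_trim_trailing_ambig := by
  intro seq mt _
  unfold Spec_trim_trailing_ambig trim_trailing_ambig trim_trailing_ambig_alt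
  simp only []
  have hle := pvRun_le seq.toList
  have hrem : ((seq.toList.length : Int) - pvKeep seq.toList)
      = ((seq.toList.reverse.takeWhile pvAmb).length : Int) := by
    rw [pvKeep_char]; omega
  by_cases h0 : seq.toList = []
  · rw [if_pos h0]
    conv_lhs => rw [← String.ofList_toList (s := seq), h0]
    rw [h0]
    congr 1
    simp [PySem.List.slice]
  · rw [if_neg h0]
    rw [pvLoopA_char seq.toList mt 0, hrem]
    congr 1
    rw [PySem.List.slice_to _ (by omega)]
    by_cases hmt : 0 ≤ mt
    · rw [PySem.List.slice_to _ (by omega)]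
      rw [List.take_eq_take_iff]
      omega
    · rw [PySem.List.slice_to _ (by omega)]
      rw [List.take_eq_take_iff]
      omega
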